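-- pv_equiv track=rewrite | github.com/WithoutHaste/RecreationalMath | pythonGenerators/generate_hogben.py | generate_hogben
-- ===== SOURCE A (Python) =====
-- def generate_hogben(max):
-- 	""" Returns an array of hogben numbers from 1 to max """
-- 	if max <= 0:
-- 		raise Exception('generate_hogben requires a positive integer')
--
-- 	is_hogben = []
-- 	n = 1
-- 	inc = 2
-- 	while n <= max:
-- 		is_hogben.append(n)
-- 		n = n + inc
-- 		inc = inc + 2
--
-- 	return is_hogben
-- ===== SOURCE B (Python) =====
-- def generate_hogben(max):
--     """ Returns an array of hogben numbers from 1 to max """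
--     if max <= 0:
--         raise Exception('generate_hogben requires a positive integer')
--     count = 0
--     while count * count + count + 1 <= max:
--         count += 1
--     return [k * k + k + 1 for k in range(count)]
-- ===== Notes on version B (the rewrite author's own statement) =====
-- stated objective: alternative
-- what changed: Two staged passes instead of A's single accumulating loop: first compute only the number of terms, then build the list as the closed form k*k+k+1 mapped over range(count).
import Mathlib
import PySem

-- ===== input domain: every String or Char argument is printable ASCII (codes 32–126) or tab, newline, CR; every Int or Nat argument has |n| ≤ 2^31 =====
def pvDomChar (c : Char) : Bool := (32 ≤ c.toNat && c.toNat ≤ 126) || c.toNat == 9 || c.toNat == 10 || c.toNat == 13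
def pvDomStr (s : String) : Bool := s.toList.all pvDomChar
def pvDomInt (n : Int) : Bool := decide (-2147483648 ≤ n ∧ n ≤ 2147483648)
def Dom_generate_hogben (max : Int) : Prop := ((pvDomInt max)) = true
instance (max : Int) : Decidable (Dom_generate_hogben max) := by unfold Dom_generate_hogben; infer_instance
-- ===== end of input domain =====

-- B replaces A's single accumulating (value, increment) loop by two staged passes:
-- count the terms first, then map the closed form k*k+k+1 over range(count); same cost.

-- ===== PORT A =====
-- A's while loop, fuel-bounded (n grows by at least 2 each step, so max.toNat + 1 fuel suffices)
def genHogbenLoopA (max : Int) : Nat → Int → Int → List Int → List Int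
  | 0, _, _, acc => acc
  | fuel + 1, n, inc, acc =>
    if n ≤ max then genHogbenLoopA max fuel (n + inc) (inc + 2) (acc ++ [n]) else acc

def generate_hogben (max : Int) : List Int :=
  if max ≤ 0 then []  -- Python raises here; excluded by Pre_
  else genHogbenLoopA max (max.toNat + 1) 1 2 []

-- ===== PORT B =====
-- B's counting while-loop, fuel-bounded (count stops at the first c with c*c+c+1 > max)
def hogbenCountB (max : Int) : Nat → Int → Int
  | 0, c => c
  | fuel + 1, c => if c * c + c + 1 ≤ max then hogbenCountB max fuel (c + 1) else c

def generate_hogben_alt (max : Int) : List Int :=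
  if max ≤ 0 then []  -- Python raises here; excluded by Pre_
  else (PySem.List.pyRange 0 (hogbenCountB max (max.toNat + 1) 0) 1).map
    (fun k => k * k + k + 1)

-- ===== PRECONDITION & SPEC =====
-- A raises Exception exactly when max ≤ 0
def Pre_generate_hogben (max : Int) : Prop := 0 < max
instance (max : Int) : Decidable (Pre_generate_hogben max) := by unfold Pre_generate_hogben; infer_instance
def pvWitness_generate_hogben : Int := (10)

def Spec_generate_hogben (max : Int) (out : List Int) : Prop := out = generate_hogben_alt max
instance (max : Int) (out : List Int) : Decidable (Spec_generate_hogben max out) := by unfold Spec_generate_hogben; infer_instance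

-- ===== CLAIM (what is proved, stated in full; the proofs are below) =====
def Claim_equal_generate_hogben : Prop := ∀ (max : Int), Dom_generate_hogben max → Pre_generate_hogben max → Spec_generate_hogben max (generate_hogben max)

-- ===== LEMMAS AND PROOFS =====

-- the counter never moves backwards
theorem hogbenCountB_ge (max : Int) (fuel : Nat) :
    ∀ c : Int, c ≤ hogbenCountB max fuel c := by
  induction fuel with
  | zero => intro c; simp [hogbenCountB]
  | succ f ih =>
    intro c
    simp only [hogbenCountB]
    split
    · exact le_trans (by omega) (ih (c + 1))
    · exact le_refl c

-- A's loop from state (k*k+k+1, 2*k+2) emits exactly the closed form over the indices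
-- k, k+1, …, hogbenCountB max fuel k - 1
theorem genHogbenLoopA_eq (max : Int) (fuel : Nat) :
    ∀ (k : Int) (acc : List Int),
      genHogbenLoopA max fuel (k * k + k + 1) (2 * k + 2) acc =
        acc ++ (PySem.List.pyRange k (hogbenCountB max fuel k) 1).map (fun j => j * j + j + 1) := by
  induction fuel with
  | zero =>
    intro k acc
    simp [genHogbenLoopA, hogbenCountB, PySem.List.pyRange_one_eq_nil (le_refl k)]
  | succ f ih =>
    intro k acc
    simp only [genHogbenLoopA, hogbenCountB]
    by_cases h : k * k + k + 1 ≤ max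
    · rw [if_pos h, if_pos h]
      have h1 : k * k + k + 1 + (2 * k + 2) = (k + 1) * (k + 1) + (k + 1) + 1 := by ring
      have h2 : 2 * k + 2 + 2 = 2 * (k + 1) + 2 := by ring
      rw [h1, h2, ih (k + 1) (acc ++ [k * k + k + 1])]
      have hk : k < hogbenCountB max f (k + 1) :=
        lt_of_lt_of_le (by omega) (hogbenCountB_ge max f (k + 1))
      rw [PySem.List.pyRange_one_cons hk]
      simp
    · rw [if_neg h, if_neg h]
      simp [PySem.List.pyRange_one_eq_nil (le_refl k)]

-- ===== VERDICT (by name: the statement is the Claim_ definition above) =====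
theorem generate_hogben_spec : Claim_equal_generate_hogben := by
  intro max _ hpre
  unfold Pre_generate_hogben at hpre
  unfold Spec_generate_hogben generate_hogben generate_hogben_alt
  rw [if_neg (by omega), if_neg (by omega)]
  have := genHogbenLoopA_eq max (max.toNat + 1) 0 []
  simpa using this
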